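-- pv_equiv track=rewrite | github.com/Kayden123121/chuanma-zhushou | server/efficiency_engine.py | mpsz_list_to_one_line
-- ===== SOURCE A (Python) =====
-- from typing import Any, Dict, List, Optional, Tuple, Union
--
-- def mpsz_list_to_one_line(tiles: List[str]) -> str:
--     """仅万/筒/条，忽略字牌（川麻 108 张）。"""
--     m, p, s = [], [], []
--     for t in tiles:
--         if not t or len(t) < 2:
--             continue
--         suit = t[-1]
--         num = t[:-1]
--         if suit == "m":
--             m.append(num)
--         elif suit == "p":
--             p.append(num)
--         elif suit == "s":
--             s.append(num)
--     parts = []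
--     if m:
--         parts.append("".join(sorted(m, key=lambda x: int(x) if x.isdigit() else 0)) + "m")
--     if p:
--         parts.append("".join(sorted(p, key=lambda x: int(x) if x.isdigit() else 0)) + "p")
--     if s:
--         parts.append("".join(sorted(s, key=lambda x: int(x) if x.isdigit() else 0)) + "s")
--     return "".join(parts)
-- ===== SOURCE B (Python) =====
-- def mpsz_list_to_one_line(tiles):
--     """仅万/筒/条，忽略字牌（川麻 108 张）。"""
--     def seg(suit):
--         nums = [t[:-1] for t in tiles if len(t) >= 2 and t[-1] == suit]
--         if not nums:
--             return ""
--         nums.sort(key=lambda x: int(x) if x.isdigit() else 0)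
--         return "".join(nums) + suit
--     return seg("m") + seg("p") + seg("s")
-- ===== Notes on version B (the rewrite author's own statement) =====
-- stated objective: simpler
-- what changed: A's single bucketing loop over three mutable lists plus three copy-pasted if/sort/join blocks is replaced by one generic per-suit helper (filter the tiles of that suit, sort, join, append the letter) applied to 'm', 'p', 's'.
import Mathlib
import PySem

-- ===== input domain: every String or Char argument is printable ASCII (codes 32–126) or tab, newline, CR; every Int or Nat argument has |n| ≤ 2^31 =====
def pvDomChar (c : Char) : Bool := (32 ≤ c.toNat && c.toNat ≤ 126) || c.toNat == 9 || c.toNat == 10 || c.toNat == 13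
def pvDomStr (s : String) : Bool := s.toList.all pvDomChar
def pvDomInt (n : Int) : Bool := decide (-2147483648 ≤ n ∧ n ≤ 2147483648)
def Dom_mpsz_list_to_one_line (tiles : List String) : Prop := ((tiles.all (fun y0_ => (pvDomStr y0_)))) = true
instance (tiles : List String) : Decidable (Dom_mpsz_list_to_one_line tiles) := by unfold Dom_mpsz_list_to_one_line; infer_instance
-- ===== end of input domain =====

-- B replaces A's bucketing loop and its three copy-pasted if-blocks by one generic per-suit
-- filter→sort→join helper applied to 'm','p','s' (objective: simpler; same asymptotic cost).

-- shared sort key: int(x) if x.isdigit() else 0 (exact on the ASCII domain: isdigit ⇒ int() parses)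
def pvKey (x : String) : Int :=
  if PySem.Str.strIsdigit x then (PySem.Int.ofStr? x).getD 0 else 0

-- ===== PORT A =====
-- literal port of A: one loop filling buckets m/p/s, then three conditional appends to `parts`
def mpsz_list_to_one_line (tiles : List String) : String :=
  let st := tiles.foldl
    (fun (st : List String × List String × List String) t =>
      if t = "" ∨ PySem.Str.len t < 2 then st
      else
        match PySem.Str.pyGet? t (-1) with            -- t[-1]; some _ whenever len(t) ≥ 2
        | none => st
        | some suit =>
          let num := PySem.Str.slice t none (some (-1))   -- t[:-1]
          if suit = 'm' then (st.1 ++ [num], st.2.1, st.2.2)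
          else if suit = 'p' then (st.1, st.2.1 ++ [num], st.2.2)
          else if suit = 's' then (st.1, st.2.1, st.2.2 ++ [num])
          else st)
    ([], [], [])
  let parts0 : List String := []
  let parts1 := if st.1 ≠ [] then parts0 ++ [PySem.Str.join "" (PySem.List.sorted st.1 pvKey false) ++ "m"] else parts0
  let parts2 := if st.2.1 ≠ [] then parts1 ++ [PySem.Str.join "" (PySem.List.sorted st.2.1 pvKey false) ++ "p"] else parts1
  let parts3 := if st.2.2 ≠ [] then parts2 ++ [PySem.Str.join "" (PySem.List.sorted st.2.2 pvKey false) ++ "s"] else parts2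
  PySem.Str.join "" parts3

-- ===== PORT B =====
-- the comprehension [t[:-1] for t in tiles if len(t) >= 2 and t[-1] == suit]
def pvBucket (tiles : List String) (suit : Char) : List String :=
  (tiles.filter
      (fun t => decide (2 ≤ PySem.Str.len t) && (PySem.Str.pyGet? t (-1) == some suit))).map
    (fun t => PySem.Str.slice t none (some (-1)))

-- seg(suit): sort the bucket, join it, append the suit letter; "" for an empty bucket
def pvSeg (tiles : List String) (suit : Char) : String :=
  let nums := pvBucket tiles suit
  if nums = [] then ""
  else PySem.Str.join "" (PySem.List.sorted nums pvKey false) ++ String.singleton suit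

def mpsz_list_to_one_line_alt (tiles : List String) : String :=
  pvSeg tiles 'm' ++ pvSeg tiles 'p' ++ pvSeg tiles 's'

-- ===== PRECONDITION & SPEC =====
def Spec_mpsz_list_to_one_line (tiles : List String) (out : String) : Prop := out = mpsz_list_to_one_line_alt tiles
instance (tiles : List String) (out : String) : Decidable (Spec_mpsz_list_to_one_line tiles out) := by unfold Spec_mpsz_list_to_one_line; infer_instance

-- ===== CLAIM (what is proved, stated in full; the proofs are below) =====
def Claim_equal_mpsz_list_to_one_line : Prop := ∀ (tiles : List String), Dom_mpsz_list_to_one_line tiles → Spec_mpsz_list_to_one_line tiles (mpsz_list_to_one_line tiles)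

-- ===== LEMMAS AND PROOFS =====

-- A's loop computes exactly B's three buckets (generalized accumulator)
lemma pvLoop_eq (tiles : List String) (a b c : List String) :
    tiles.foldl
      (fun (st : List String × List String × List String) t =>
        if t = "" ∨ PySem.Str.len t < 2 then st
        else
          match PySem.Str.pyGet? t (-1) with
          | none => st
          | some suit =>
            let num := PySem.Str.slice t none (some (-1))
            if suit = 'm' then (st.1 ++ [num], st.2.1, st.2.2)
            else if suit = 'p' then (st.1, st.2.1 ++ [num], st.2.2)
            else if suit = 's' then (st.1, st.2.1, st.2.2 ++ [num])
            else st)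
      (a, b, c)
    = (a ++ pvBucket tiles 'm', b ++ pvBucket tiles 'p', c ++ pvBucket tiles 's') := by
  induction tiles generalizing a b c with
  | nil => simp [pvBucket]
  | cons t ts ih =>
    by_cases h2 : 2 ≤ PySem.Str.len t
    · have h2' : 2 ≤ t.length := by
        have h := PySem.Str.len_eq t
        have hTL := String.length_toList (s := t)
        omega
      have hne : t ≠ "" := by
        intro h; rw [h] at h2; exact absurd h2 (by decide)
      have hguard : ¬ (t = "" ∨ PySem.Str.len t < 2) := by
        rintro (h | h)
        · exact hne h
        · omega
      have hlist : t.toList ≠ [] := by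
        intro h
        have hl := PySem.Str.len_eq t
        rw [show t.toList.length = 0 from by simp [h]] at hl
        omega
      obtain ⟨lc, hlc⟩ : ∃ lc, PySem.Str.pyGet? t (-1) = some lc := by
        simp [PySem.List.pyGet?_neg_one]
        exact Option.isSome_iff_exists.mp (List.getLast?_isSome.mpr hlist)
      have hlc' : PySem.List.pyGet? t.toList (-1) = some lc := by simpa using hlc
      simp only [List.foldl_cons, if_neg hguard, hlc]
      by_cases hm : lc = 'm'
      · subst hm
        rw [ih]
        simp [pvBucket, h2', hlc', List.append_assoc]
      · by_cases hp : lc = 'p'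
        · subst hp
          rw [if_neg (by decide : ¬ ('p' : Char) = 'm'), ih]
          simp [pvBucket, h2', hlc', List.append_assoc]
        · by_cases hs : lc = 's'
          · subst hs
            rw [if_neg (by decide : ¬ ('s' : Char) = 'm'),
              if_neg (by decide : ¬ ('s' : Char) = 'p'), ih]
            simp [pvBucket, h2', hlc', List.append_assoc]
          · rw [if_neg hm, if_neg hp, if_neg hs, ih]
            simp [pvBucket, hlc', hm, hp, hs]
    · have h2' : ¬ 2 ≤ t.length := by
        have h := PySem.Str.len_eq t
        have hTL := String.length_toList (s := t)
        omega
      have hguard : t = "" ∨ PySem.Str.len t < 2 := Or.inr (by omega)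
      simp only [List.foldl_cons, if_pos hguard]
      rw [ih]
      simp [pvBucket, h2']

-- joining with "" concatenates
lemma pvJoin_nil : PySem.Str.join "" ([] : List String) = "" := by decide

-- intercalating with the empty separator is flattening
lemma pvInterNil (l : List (List Char)) : ([] : List Char).intercalate l = l.flatten := by
  induction l with
  | nil => simp [List.intercalate]
  | cons a t ih => cases t <;> simp_all [List.intercalate, List.intersperse]

lemma pvJoin_cons (x : String) (l : List String) :
    PySem.Str.join "" (x :: l) = x ++ PySem.Str.join "" l := by
  apply String.toList_inj.mp
  simp [PySem.Str.join, PySem.Chars.join, pvInterNil]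

-- ===== VERDICT (by name: the statement is the Claim_ definition above) =====
theorem mpsz_list_to_one_line_spec : Claim_equal_mpsz_list_to_one_line := by
  intro tiles _
  unfold Spec_mpsz_list_to_one_line mpsz_list_to_one_line mpsz_list_to_one_line_alt
  rw [pvLoop_eq]
  simp only [List.nil_append, pvSeg]
  have hsm : String.singleton 'm' = "m" := by decide
  have hsp : String.singleton 'p' = "p" := by decide
  have hss : String.singleton 's' = "s" := by decide
  rw [hsm, hsp, hss]
  by_cases hm : pvBucket tiles 'm' = [] <;>
    by_cases hp : pvBucket tiles 'p' = [] <;>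
      by_cases hs : pvBucket tiles 's' = [] <;>
        simp [hm, hp, hs, pvJoin_nil, pvJoin_cons, String.append_assoc]
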